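-- pv_equiv track=rewrite | github.com/hoodakaushal/Assignments | zzz/ADA/HW1/decompose.py | edgelist_to_vertexlist
-- ===== SOURCE A (Python) =====
-- def edgelist_to_vertexlist(list_edgelist):
--     list_vertexlist = []
--     for edgelist in list_edgelist:
--         vertexlist = []
--         for edge in edgelist:
--             if edge[0] not in vertexlist:
--                 vertexlist += [edge[0]]
--             if edge[1] not in vertexlist:
--                 vertexlist += [edge[1]]
--         list_vertexlist += [vertexlist]
--     return list_vertexlist
-- ===== SOURCE B (Python) =====
-- def edgelist_to_vertexlist(list_edgelist):
--     def uniq(stream):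
--         out = []
--         rest = stream
--         while rest:
--             head = rest[0]
--             out.append(head)
--             rest = [v for v in rest if v != head]
--         return out
--     return [uniq([v for edge in edgelist for v in (edge[0], edge[1])])
--             for edgelist in list_edgelist]
-- ===== Notes on version B (the rewrite author's own statement) =====
-- stated objective: alternative
-- what changed: Instead of membership-guarded appends into a growing vertex list, B flattens each edgelist into one vertex stream and deduplicates it by repeatedly taking the first remaining vertex and filtering all its occurrences out of the rest (selection-style extraction), so no membership test over an accumulator is ever made.
import Mathlib
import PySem

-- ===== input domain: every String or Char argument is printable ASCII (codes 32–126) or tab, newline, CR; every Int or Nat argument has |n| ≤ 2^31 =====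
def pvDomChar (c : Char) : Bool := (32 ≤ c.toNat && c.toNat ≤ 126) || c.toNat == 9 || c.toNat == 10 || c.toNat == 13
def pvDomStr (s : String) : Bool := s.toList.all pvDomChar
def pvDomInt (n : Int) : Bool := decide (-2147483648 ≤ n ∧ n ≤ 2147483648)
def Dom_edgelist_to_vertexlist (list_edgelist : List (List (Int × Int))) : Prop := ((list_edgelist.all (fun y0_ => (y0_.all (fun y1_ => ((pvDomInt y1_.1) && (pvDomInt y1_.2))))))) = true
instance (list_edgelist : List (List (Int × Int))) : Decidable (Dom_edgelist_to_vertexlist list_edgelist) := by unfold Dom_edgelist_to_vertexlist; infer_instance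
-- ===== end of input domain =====

-- B deduplicates each flattened vertex stream by repeatedly extracting the first remaining vertex and filtering out all its occurrences, instead of A's membership-guarded appends (objective: alternative).


-- ===== PORT A =====
def edgelist_to_vertexlist (list_edgelist : List (List (Int × Int))) : List (List Int) :=
  list_edgelist.foldl (fun list_vertexlist edgelist =>
    list_vertexlist ++ [edgelist.foldl (fun vertexlist edge =>
      let vertexlist := if vertexlist.contains edge.1 then vertexlist else vertexlist ++ [edge.1]
      if vertexlist.contains edge.2 then vertexlist else vertexlist ++ [edge.2]) []]) []

-- ===== PORT B =====
-- B's while loop: out.append(rest[0]); rest = [v for v in rest if v != rest[0]]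
def uniqGo (out : List Int) : List Int → List Int
  | [] => out
  | a :: t => uniqGo (out ++ [a]) ((a :: t).filter (fun v => decide (v ≠ a)))
termination_by rest => rest.length
decreasing_by
  simpa using Nat.lt_succ_of_le (List.length_filter_le _ _)

def edgelist_to_vertexlist_alt (list_edgelist : List (List (Int × Int))) : List (List Int) :=
  list_edgelist.map (fun edgelist =>
    uniqGo [] (edgelist.flatMap (fun edge => [edge.1, edge.2])))

-- ===== PRECONDITION & SPEC =====
def Spec_edgelist_to_vertexlist (list_edgelist : List (List (Int × Int))) (out : List (List Int)) : Prop := out = edgelist_to_vertexlist_alt list_edgelist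
instance (list_edgelist : List (List (Int × Int))) (out : List (List Int)) : Decidable (Spec_edgelist_to_vertexlist list_edgelist out) := by unfold Spec_edgelist_to_vertexlist; infer_instance

-- ===== CLAIM (what is proved, stated in full; the proofs are below) =====
def Claim_equal_edgelist_to_vertexlist : Prop := ∀ (list_edgelist : List (List (Int × Int))), Dom_edgelist_to_vertexlist list_edgelist → Spec_edgelist_to_vertexlist list_edgelist (edgelist_to_vertexlist list_edgelist)

-- ===== LEMMAS AND PROOFS =====

-- A's inner loop over the edges equals folding Set.add over the flattened vertex stream.
lemma inner_fold_eq_update (edges : List (Int × Int)) (acc : PySem.Set Int) :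
    edges.foldl (fun vertexlist edge =>
      let vertexlist := if vertexlist.contains edge.1 then vertexlist else vertexlist ++ [edge.1]
      if vertexlist.contains edge.2 then vertexlist else vertexlist ++ [edge.2]) acc
    = PySem.Set.update acc (edges.flatMap (fun edge => [edge.1, edge.2])) := by
  induction edges generalizing acc with
  | nil => simp [PySem.Set.update]
  | cons e es ih =>
      simp only [List.foldl_cons, List.flatMap_cons, ih]
      rfl

-- adding elements already filtered against a ∈ acc changes nothing
lemma foldl_add_filter (a : Int) :
    ∀ (t acc : List Int), a ∈ acc →
      t.foldl PySem.Set.add acc = (t.filter (fun v => decide (v ≠ a))).foldl PySem.Set.add acc := by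
  intro t
  induction t with
  | nil => intro acc _; rfl
  | cons x xs ih =>
      intro acc ha
      by_cases hx : x = a
      · subst hx
        have hadd : PySem.Set.add acc x = acc := by
          simp [PySem.Set.add, PySem.Set.contains, ha]
        rw [List.foldl_cons, hadd]
        simpa using ih acc ha
      · simp only [List.filter_cons, ne_eq, hx, not_false_eq_true, decide_true, List.foldl_cons]
        exact ih _ (by
          simp only [PySem.Set.add, PySem.Set.contains]
          split <;> simp [ha])

-- a leading element absent from the rest commutes out of the fold
lemma foldl_add_cons (a : Int) :
    ∀ (t acc : List Int), (∀ x ∈ t, x ≠ a) →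
      t.foldl PySem.Set.add (a :: acc) = a :: t.foldl PySem.Set.add acc := by
  intro t
  induction t with
  | nil => intro acc _; rfl
  | cons x xs ih =>
      intro acc h
      have hxb : (x == a) = false := beq_eq_false_iff_ne.mpr (h x (by simp))
      simp only [List.foldl_cons]
      have hstep : PySem.Set.add (a :: acc) x = a :: PySem.Set.add acc x := by
        simp only [PySem.Set.add, PySem.Set.contains, List.contains_cons, hxb, Bool.false_or]
        split <;> simp
      rw [hstep]
      exact ih _ (fun y hy => h y (by simp [hy]))

-- accumulator of B's loop splits off
lemma uniqGo_acc : ∀ (n : ℕ) (rest : List Int), rest.length ≤ n →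
    ∀ out, uniqGo out rest = out ++ uniqGo [] rest := by
  intro n
  induction n with
  | zero =>
      intro rest h out
      have : rest = [] := List.eq_nil_of_length_eq_zero (Nat.le_zero.mp h)
      subst this; simp [uniqGo]
  | succ n ih =>
      intro rest h out
      cases rest with
      | nil => simp [uniqGo]
      | cons a t =>
          rw [uniqGo, uniqGo]
          have hlen : ((a :: t).filter (fun v => decide (v ≠ a))).length ≤ n := by
            simp only [List.filter_cons, ne_eq, not_true_eq_false, decide_false,
              Bool.false_eq_true, if_false]
            exact le_trans (List.length_filter_le _ _) (Nat.succ_le_succ_iff.mp h)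
          rw [ih _ hlen (out ++ [a]), ih _ hlen ([] ++ [a])]
          simp

-- B's loop computes set(stream) in first-occurrence order
lemma uniqGo_eq_ofList : ∀ (n : ℕ) (l : List Int), l.length ≤ n →
    uniqGo [] l = PySem.Set.ofList l := by
  intro n
  induction n with
  | zero =>
      intro l h
      have : l = [] := List.eq_nil_of_length_eq_zero (Nat.le_zero.mp h)
      subst this; simp [uniqGo]
  | succ n ih =>
      intro l h
      cases l with
      | nil => simp [uniqGo]
      | cons a t =>
          have hfa : (a :: t).filter (fun v => decide (v ≠ a)) = t.filter (fun v => decide (v ≠ a)) := by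
            simp
          have hlen : (t.filter (fun v => decide (v ≠ a))).length ≤ n :=
            le_trans (List.length_filter_le _ _) (Nat.succ_le_succ_iff.mp h)
          rw [uniqGo, hfa, uniqGo_acc _ _ (by simpa [hfa] using hlen) ([] ++ [a]),
            ih _ hlen]
          show [a] ++ _ = t.foldl PySem.Set.add (PySem.Set.add [] a)
          have hadd : PySem.Set.add ([] : List Int) a = [a] := rfl
          rw [hadd, foldl_add_filter a t [a] (by simp),
            foldl_add_cons a _ [] (by intro x hx; exact (List.mem_filter.mp hx).2 |> of_decide_eq_true)]
          rfl

-- ===== VERDICT (by name: the statement is the Claim_ definition above) =====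
theorem edgelist_to_vertexlist_spec : Claim_equal_edgelist_to_vertexlist := by
  intro L h
  clear h
  unfold Spec_edgelist_to_vertexlist edgelist_to_vertexlist edgelist_to_vertexlist_alt
  rw [PySem.List.foldl_append_eq_flatMap, List.nil_append]
  induction L with
  | nil => rfl
  | cons el els ih =>
      rw [List.flatMap_cons, List.map_cons, ih, List.singleton_append]
      refine congrArg (fun v => v :: _) ?_
      exact (inner_fold_eq_update el []).trans (uniqGo_eq_ofList _ _ (le_refl _)).symm
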